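-- pv_equiv track=rewrite | github.com/TomaszMielecki/pp1_clone | 04-Subroutines/p47.py | f
-- ===== SOURCE A (Python) =====
-- def f(text):
--     text = str(text)
--
--     wynik= ""
--
--     for letter in text:
--         if letter == text[0]:
--             wynik=wynik+str(letter)
--         else:
--             wynik=wynik+"-"+str(letter)
--     return wynik
-- ===== SOURCE B (Python) =====
-- import re
--
-- def f(text):
--     text = str(text)
--     if not text:
--         return ""
--     c = text[0]
--     return re.sub(f"[^{re.escape(c)}]", r"-\g<0>", text)
-- ===== Notes on version B (the rewrite author's own statement) =====
-- stated objective: idiomatic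
-- what changed: Replaces the explicit per-character accumulator loop (quadratic string concatenation) with a single linear re.sub pass that prefixes a dash before every character differing from the first character.
import Mathlib
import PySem

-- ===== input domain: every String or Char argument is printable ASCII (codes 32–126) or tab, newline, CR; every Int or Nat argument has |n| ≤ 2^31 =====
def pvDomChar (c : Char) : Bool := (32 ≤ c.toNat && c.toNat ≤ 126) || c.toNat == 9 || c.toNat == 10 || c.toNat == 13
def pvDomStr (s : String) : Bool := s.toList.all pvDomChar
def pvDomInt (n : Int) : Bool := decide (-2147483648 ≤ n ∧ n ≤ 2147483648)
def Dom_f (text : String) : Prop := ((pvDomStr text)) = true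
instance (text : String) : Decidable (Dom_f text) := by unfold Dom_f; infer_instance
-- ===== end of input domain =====

-- B replaces A's per-character accumulator loop with one regex substitution (idiomatic); same output.

-- ===== PORT A =====
-- literal port of A: accumulate wynik, comparing each letter with text[0]
def f (text : String) : String :=
  text.toList.foldl
    (fun wynik letter =>
      if some letter = PySem.Str.pyGet? text 0 then wynik ++ letter.toString
      else wynik ++ "-" ++ letter.toString)
    ""

-- ===== PORT B =====
-- port of B: re.sub("[^c]", "-\g<0>", text) replaces each char ≠ c by '-' followed by
-- that char; the regex engine's single pass is ported exactly as a per-character flatMap.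
def f_alt (text : String) : String :=
  if text = "" then ""
  else
    String.ofList (text.toList.flatMap
      (fun ch => if ch = text.toList.head! then [ch] else ['-', ch]))

-- ===== PRECONDITION & SPEC =====
def Spec_f (text : String) (out : String) : Prop := out = f_alt text
instance (text : String) (out : String) : Decidable (Spec_f text out) := by unfold Spec_f; infer_instance

-- ===== CLAIM (what is proved, stated in full; the proofs are below) =====
def Claim_equal_f : Prop := ∀ (text : String), Dom_f text → Spec_f text (f text)

-- ===== LEMMAS AND PROOFS =====

theorem f_loop (c : Char) (l : List Char) (acc : String) :
    l.foldl (fun wynik letter =>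
        if some letter = some c then wynik ++ letter.toString
        else wynik ++ "-" ++ letter.toString) acc
      = acc ++ String.ofList (l.flatMap (fun ch => if ch = c then [ch] else ['-', ch])) := by
  induction l generalizing acc with
  | nil => apply String.toList_inj.mp; simp
  | cons ch rest ih =>
      simp only [List.foldl_cons, List.flatMap_cons, ih]
      by_cases h : ch = c <;>
        (apply String.toList_inj.mp; simp [h, Char.toString])

-- ===== VERDICT (by name: the statement is the Claim_ definition above) =====
theorem f_spec : Claim_equal_f := by
  intro text _
  unfold Spec_f f f_alt
  rcases h : text.toList with _ | ⟨c, rest⟩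
  · have : text = "" := by simp_all
    simp [this]
  · have hne : text ≠ "" := by
      intro he; rw [he] at h; simp at h
    have hget : PySem.Str.pyGet? text 0 = some c := by
      simp [PySem.Str.pyGet?, PySem.List.pyGet?, PySem.List.pyIdx?, h]
    rw [if_neg hne]
    simp only [hget]
    rw [f_loop c]
    apply String.toList_inj.mp
    simp only [String.toList_append, String.toList_ofList, String.toList_empty,
      List.nil_append, List.head!_cons]
    congr 1
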